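-- pv_equiv track=rewrite | github.com/chailab-umich/BeyondBinary-ParaphasiaDetection | AphasiaBank/binary/Scripts_LOSO_Transcription_binary.py | TD_helper
-- ===== SOURCE A (Python) =====
-- def TD_helper(true_labels, predicted_labels):
--     TTC = 0
--     for i in range(len(true_labels)):
--         # for paraphasia label
--         if true_labels[i] != 'c':
--             min_distance_for_label = max(i-0,len(true_labels)-i)
--             for j in range(len(predicted_labels)):
--                 if true_labels[i] == predicted_labels[j]:
--                     # check for min distance
--                     if abs(i - j) < min_distance_for_label:
--                         min_distance_for_label = abs(i - j)
--
--             TTC += min_distance_for_label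
--
--
--     CTT = 0
--     for j in range(len(predicted_labels)):
--         if predicted_labels[j] != 'c':
--             min_distance_for_label = max(j-0,len(predicted_labels)-j)
--             for i in range(len(true_labels)):
--                 if true_labels[i] == predicted_labels[j]:
--                     # check for min distance
--                     if abs(i - j) < min_distance_for_label:
--                         min_distance_for_label = abs(i - j)
--
--             CTT += min_distance_for_label
--     return TTC + CTT
-- ===== SOURCE B (Python) =====
-- def TD_helper(true_labels, predicted_labels):
--     def side(xs, ys):
--         index = {}
--         for j, y in enumerate(ys):
--             index.setdefault(y, []).append(j)
--         total = 0
--         for i, x in enumerate(xs):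
--             if x != 'c':
--                 cap = max(i, len(xs) - i)
--                 total += min([cap] + [abs(i - j) for j in index.get(x, [])])
--         return total
--     return side(true_labels, predicted_labels) + side(predicted_labels, true_labels)
-- ===== Notes on version B (the rewrite author's own statement) =====
-- stated objective: alternative
-- what changed: B replaces A's two copy-pasted quadratic loops (each scanning the entire other list for every non-'c' element) by one symmetric helper that first groups each label's positions into a dict in a single pass, then takes the min distance over only the positions of the matching label (capped by the default max(i, len-i)).
import Mathlib
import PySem

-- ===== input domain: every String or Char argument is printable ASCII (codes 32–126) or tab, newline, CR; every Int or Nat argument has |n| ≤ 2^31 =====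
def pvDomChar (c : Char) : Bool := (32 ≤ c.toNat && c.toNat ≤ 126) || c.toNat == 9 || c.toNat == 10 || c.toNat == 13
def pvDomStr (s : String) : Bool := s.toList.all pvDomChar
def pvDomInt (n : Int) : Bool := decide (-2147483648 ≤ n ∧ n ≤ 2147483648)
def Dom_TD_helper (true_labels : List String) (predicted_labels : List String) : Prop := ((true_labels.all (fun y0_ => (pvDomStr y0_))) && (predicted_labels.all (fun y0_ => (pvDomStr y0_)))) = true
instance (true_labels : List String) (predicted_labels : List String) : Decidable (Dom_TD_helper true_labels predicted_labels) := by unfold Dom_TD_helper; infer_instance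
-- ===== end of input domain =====

-- Header: B replaces A's two quadratic nested index scans by one symmetric helper that
-- first groups each label's positions in a dict, so the inner scan over the whole other
-- list disappears (only positions of the matching label are visited); alternative decomposition.

-- ===== PORT A =====
-- Indices i/j always lie in range(len), so `getD _ ""` is exact for `true_labels[i]` / `predicted_labels[j]`.
def TD_helper (true_labels : List String) (predicted_labels : List String) : Int :=
  let TTC : Int := (List.range true_labels.length).foldl (fun TTC i =>
    if true_labels.getD i "" ≠ "c" then
      TTC + (List.range predicted_labels.length).foldl (fun d j =>
          if true_labels.getD i "" = predicted_labels.getD j "" then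
            (if |(i : Int) - (j : Int)| < d then |(i : Int) - (j : Int)| else d)
          else d)
        (max ((i : Int) - 0) ((true_labels.length : Int) - (i : Int)))
    else TTC) 0
  let CTT : Int := (List.range predicted_labels.length).foldl (fun CTT j =>
    if predicted_labels.getD j "" ≠ "c" then
      CTT + (List.range true_labels.length).foldl (fun d i =>
          if true_labels.getD i "" = predicted_labels.getD j "" then
            (if |(i : Int) - (j : Int)| < d then |(i : Int) - (j : Int)| else d)
          else d)
        (max ((j : Int) - 0) ((predicted_labels.length : Int) - (j : Int)))
    else CTT) 0
  TTC + CTT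

-- ===== PORT B =====
-- `index.setdefault(y, []).append(j)` is value-wise `index[y] = index.get(y, []) + [j]`, i.e. Dict.modify.
def TD_side (xs : List String) (ys : List String) : Int :=
  let index : PySem.Dict String (List Int) :=
    (PySem.List.enumerate ys).foldl (fun d p => d.modify p.2 [] (· ++ [p.1])) PySem.Dict.empty
  (PySem.List.enumerate xs).foldl (fun total p =>
    if p.2 ≠ "c" then
      total + (((index.getD p.2 []).map (fun j => |p.1 - j|)).foldl min
                 (max p.1 ((xs.length : Int) - p.1)))
    else total) 0

def TD_helper_alt (true_labels : List String) (predicted_labels : List String) : Int :=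
  TD_side true_labels predicted_labels + TD_side predicted_labels true_labels

-- ===== PRECONDITION & SPEC =====
def Spec_TD_helper (true_labels : List String) (predicted_labels : List String) (out : Int) : Prop := out = TD_helper_alt true_labels predicted_labels
instance (true_labels : List String) (predicted_labels : List String) (out : Int) : Decidable (Spec_TD_helper true_labels predicted_labels out) := by unfold Spec_TD_helper; infer_instance

-- ===== CLAIM (what is proved, stated in full; the proofs are below) =====
def Claim_equal_TD_helper : Prop := ∀ (true_labels : List String) (predicted_labels : List String), Dom_TD_helper true_labels predicted_labels → Spec_TD_helper true_labels predicted_labels (TD_helper true_labels predicted_labels)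

-- ===== LEMMAS AND PROOFS =====

-- The grouping loop of B: looking up x yields exactly the first components of the matching pairs.
theorem getD_groupFold (l : List (Int × String)) (d : PySem.Dict String (List Int)) (x : String) :
    (l.foldl (fun d p => d.modify p.2 [] (· ++ [p.1])) d).getD x []
      = d.getD x [] ++ (l.filter (fun p => p.2 == x)).map (·.1) := by
  induction l generalizing d with
  | nil => simp
  | cons p l ih =>
    simp only [List.foldl_cons, ih, List.filter_cons]
    by_cases h : p.2 = x
    · simp [h]
    · simp [h, PySem.Dict.getD_modify, Ne.symm h]

-- A's update "if |i-j| < d then |i-j| else d" is min.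
theorem ite_lt_eq_min (v d : Int) : (if v < d then v else d) = min d v := by
  rcases lt_or_ge v d with h | h <;> simp [min_def] <;> omega

-- A's inner scan over all of ys equals the min-fold over the matching positions only.
theorem inner_eq (ys : List String) (x : String) (i c0 : Int) :
    (List.range ys.length).foldl (fun d j =>
        if x = ys.getD j "" then
          (if |i - (j : Int)| < d then |i - (j : Int)| else d)
        else d) c0
      = (((PySem.List.enumerate ys).filter (fun p => p.2 == x)).map (fun p => |i - p.1|)).foldl min c0 := by
  induction ys using List.reverseRecOn with
  | nil => simp [PySem.List.enumerate]
  | append_singleton zs y ih =>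
    have hfront : (List.range zs.length).foldl (fun d j =>
        if x = (zs ++ [y]).getD j "" then
          (if |i - (j : Int)| < d then |i - (j : Int)| else d)
        else d) c0
        = (List.range zs.length).foldl (fun d j =>
        if x = zs.getD j "" then
          (if |i - (j : Int)| < d then |i - (j : Int)| else d)
        else d) c0 := by
      refine List.foldl_ext _ _ _ ?_
      intro a j hj
      rw [List.mem_range] at hj
      rw [List.getD_append _ _ _ _ hj]
    rw [List.length_append, List.length_singleton, List.range_succ, List.foldl_append,
        PySem.List.enumerate_append, hfront, ih]
    simp only [PySem.List.enumerate, List.filter_append, List.map_append, List.foldl_append]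
    by_cases h : y = x
    · simp [h, ite_lt_eq_min]
    · have h' : ¬x = y := fun hx => h hx.symm
      simp [h, h']

-- A loop over range(len xs) reading xs.getD is the loop over enumerate(xs).
theorem foldl_range_eq_enumerate {α : Type} (xs : List α) (dflt : α)
    (g : Int → Int → α → Int) (a : Int) :
    (List.range xs.length).foldl (fun acc (i : Nat) => g acc (i : Int) (xs.getD i dflt)) a
      = (PySem.List.enumerate xs).foldl (fun acc p => g acc p.1 p.2) a := by
  induction xs using List.reverseRecOn with
  | nil => simp [PySem.List.enumerate]
  | append_singleton zs y ih =>
    have hfront : (List.range zs.length).foldl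
        (fun acc (i : Nat) => g acc (i : Int) ((zs ++ [y]).getD i dflt)) a
        = (List.range zs.length).foldl (fun acc (i : Nat) => g acc (i : Int) (zs.getD i dflt)) a := by
      refine List.foldl_ext _ _ _ ?_
      intro a j hj
      rw [List.mem_range] at hj
      rw [List.getD_append _ _ _ _ hj]
    rw [List.length_append, List.length_singleton, List.range_succ, List.foldl_append,
        PySem.List.enumerate_append, hfront, ih]
    simp [PySem.List.enumerate]

-- One side of A (condition written x = y) equals B's helper.
theorem side_eq (xs ys : List String) :
    (List.range xs.length).foldl (fun acc i =>
        if xs.getD i "" ≠ "c" then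
          acc + (List.range ys.length).foldl (fun d j =>
              if xs.getD i "" = ys.getD j "" then
                (if |(i : Int) - (j : Int)| < d then |(i : Int) - (j : Int)| else d)
              else d)
            (max ((i : Int) - 0) ((xs.length : Int) - (i : Int)))
        else acc) 0
      = TD_side xs ys := by
  refine (foldl_range_eq_enumerate xs ""
      (fun acc i x =>
        if x ≠ "c" then
          acc + (List.range ys.length).foldl (fun d j =>
              if x = ys.getD j "" then
                (if |i - (j : Int)| < d then |i - (j : Int)| else d)
              else d)
            (max (i - 0) ((xs.length : Int) - i))
        else acc) 0).trans ?_
  unfold TD_side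
  refine List.foldl_ext _ _ _ ?_
  intro a p hp
  by_cases hc : p.2 = "c"
  · simp [hc]
  · simp only [hc, ne_eq, not_false_iff, if_pos]
    rw [inner_eq, getD_groupFold]
    simp [List.map_map, Function.comp_def, sub_zero]

-- The other side of A writes the condition the other way round.
theorem side_eq' (xs ys : List String) :
    (List.range xs.length).foldl (fun acc i =>
        if xs.getD i "" ≠ "c" then
          acc + (List.range ys.length).foldl (fun d j =>
              if ys.getD j "" = xs.getD i "" then
                (if |(j : Int) - (i : Int)| < d then |(j : Int) - (i : Int)| else d)
              else d)
            (max ((i : Int) - 0) ((xs.length : Int) - (i : Int)))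
        else acc) 0
      = TD_side xs ys := by
  refine Eq.trans ?_ (side_eq xs ys)
  refine List.foldl_ext _ _ _ ?_
  intro a i hi
  have hin : (List.range ys.length).foldl (fun d j =>
      if ys.getD j "" = xs.getD i "" then
        (if |(j : Int) - (i : Int)| < d then |(j : Int) - (i : Int)| else d)
      else d) (max ((i : Int) - 0) ((xs.length : Int) - (i : Int)))
      = (List.range ys.length).foldl (fun d j =>
      if xs.getD i "" = ys.getD j "" then
        (if |(i : Int) - (j : Int)| < d then |(i : Int) - (j : Int)| else d)
      else d) (max ((i : Int) - 0) ((xs.length : Int) - (i : Int))) := by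
    refine List.foldl_ext _ _ _ ?_
    intro d j hj
    rw [abs_sub_comm]
    exact if_congr ⟨Eq.symm, Eq.symm⟩ rfl rfl
  rw [hin]


-- ===== VERDICT (by name: the statement is the Claim_ definition above) =====
theorem TD_helper_spec : Claim_equal_TD_helper := by
  intro t p _
  show TD_helper t p = TD_helper_alt t p
  simp only [TD_helper, TD_helper_alt]
  rw [side_eq t p, side_eq' p t]
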